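-- pv_equiv track=rewrite | github.com/Peter-Kisselev/cmimc-2025 | bid/AI_solution.py | _get_card_by_rank
-- ===== SOURCE A (Python) =====
-- def _get_card_by_rank(bitmask, n, highest_first):
--     """
--     Finds the nth available card (1-based index n) represented in the bitmask.
--     Bits 1 to 15 of the bitmask correspond to cards 1 to 15.
--     - bitmask: Integer mask where set bits indicate available cards.
--     - n: The rank to find (e.g., 1 for the lowest/highest, 2 for the second, etc.). Must be >= 1.
--     - highest_first: If True, finds the nth highest available card.
--                      If False, finds the nth lowest available card.
--     Returns the card number (1-15).
--     Includes a fallback mechanism: If 'n' is greater than the number of available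
--     cards, it returns the actual highest (if highest_first=True) or
--     lowest (if highest_first=False) available card.
--     Returns 0 if the bitmask is empty (no cards available).
--     """
--     # Ensure rank 'n' is at least 1 for correct logic.
--     if n <= 0:
--         n = 1
--
--     count = 0
--     # Stores the first card found when iterating, used as fallback.
--     fallback_card = 0
--
--     if highest_first:
--         # Iterate downwards from card 15 to 1 to find highest ranks first.
--         for i in range(15, 0, -1):
--             # Check if the bit corresponding to card 'i' is set in the mask.
--             if (bitmask >> i) & 1:
--                 # If this is the first available card found, store it as fallback (it's the highest).
--                 if fallback_card == 0:
--                     fallback_card = i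
--                 count += 1
--                 # If we have found the nth card, return it.
--                 if count == n:
--                     return i
--         # If the loop finishes without returning, n was >= total available cards.
--         # Return the highest card found (stored in fallback_card).
--         return fallback_card
--     else:
--         # Iterate upwards from card 1 to 15 to find lowest ranks first.
--         for i in range(1, 16):
--             # Check if the bit corresponding to card 'i' is set in the mask.
--             if (bitmask >> i) & 1:
--                 # If this is the first available card found, store it as fallback (it's the lowest).
--                 if fallback_card == 0:
--                     fallback_card = i
--                 count += 1
--                 # If we have found the nth card, return it.
--                 if count == n:
--                     return i
--         # If the loop finishes without returning, n was >= total available cards.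
--         # Return the lowest card found (stored in fallback_card).
--         return fallback_card
-- ===== SOURCE B (Python) =====
-- def _get_card_by_rank(bitmask, n, highest_first):
--     # Bit-arithmetic: mask to bits 1..15, clamp the rank, then strip ranked-higher
--     # set bits with bit tricks (m&(m-1) drops the lowest, m^(1<<top) drops the
--     # highest) and read off the remaining extreme bit's index.
--     m = bitmask & 0xFFFE
--     if m == 0:
--         return 0
--     cnt = bin(m).count("1")
--     r = n if 1 <= n <= cnt else 1   # out-of-range rank falls back to the extreme card
--     if highest_first:
--         for _ in range(r - 1):
--             m ^= 1 << (m.bit_length() - 1)   # drop highest set bit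
--         return m.bit_length() - 1
--     else:
--         for _ in range(r - 1):
--             m &= m - 1                       # drop lowest set bit
--         return (m & -m).bit_length() - 1
-- ===== Notes on version B (the rewrite author's own statement) =====
-- stated objective: alternative
-- what changed: Replaces A's positional scan over card slots 15..1 / 1..15 with count and fallback accumulators by bit arithmetic on the mask itself: restrict to bits 1..15 (m = bitmask & 0xFFFE), clamp the rank via the popcount, strip the ranked-ahead set bits with m &= m-1 (lowest) or m ^= 1<<(bitlen-1) (highest), and read off the remaining extreme bit's index.
import Mathlib
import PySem

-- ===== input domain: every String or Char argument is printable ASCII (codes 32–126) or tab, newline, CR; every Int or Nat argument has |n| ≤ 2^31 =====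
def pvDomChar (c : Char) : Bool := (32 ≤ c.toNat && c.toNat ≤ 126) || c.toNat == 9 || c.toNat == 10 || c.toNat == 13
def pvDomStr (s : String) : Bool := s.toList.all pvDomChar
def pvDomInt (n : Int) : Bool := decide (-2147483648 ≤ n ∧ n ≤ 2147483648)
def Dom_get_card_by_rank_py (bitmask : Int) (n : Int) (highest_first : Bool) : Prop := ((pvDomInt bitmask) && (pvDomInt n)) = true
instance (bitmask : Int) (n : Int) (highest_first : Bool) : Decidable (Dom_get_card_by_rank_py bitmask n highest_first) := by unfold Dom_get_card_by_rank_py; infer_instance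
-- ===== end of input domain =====

-- B replaces A's positional scan over cards 15..1 / 1..15 (count + fallback accumulators)
-- by bit arithmetic on the mask itself: restrict to bits 1..15, clamp the rank, strip the
-- ranked-ahead set bits with m&(m-1) / m^(1<<(bitlen-1)), and read off the extreme bit.

-- shared bit test: Python's '(bitmask >> i) & 1' is truthy (i ≥ 0 on both card ranges)
def pvBit (bitmask i : Int) : Bool := PySem.Int.band (bitmask >>> i.toNat) 1 != 0

-- ===== PORT A =====
-- A's counting loop over one direction's card order
def pvALoop (bitmask n : Int) : List Int → Int → Int → Int
  | [], _count, fallback => fallback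
  | i :: rest, count, fallback =>
    if pvBit bitmask i then
      let fallback' := if fallback = 0 then i else fallback
      if count + 1 = n then i
      else pvALoop bitmask n rest (count + 1) fallback'
    else pvALoop bitmask n rest count fallback

def get_card_by_rank_py (bitmask : Int) (n : Int) (highest_first : Bool) : Int :=
  let n := if n ≤ 0 then 1 else n
  if highest_first then pvALoop bitmask n (PySem.List.pyRange 15 0 (-1)) 0 0
  else pvALoop bitmask n (PySem.List.pyRange 1 16 1) 0 0

-- ===== PORT B =====
-- transliteration of Source B: 0xFFFE = 65534, bin(m).count("1") = PySem.Int.bitCount m,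
-- m.bit_length() = PySem.Int.bitLength m, 'for _ in range(r-1)' = foldl over pyRange 0 (r-1)
def get_card_by_rank_py_alt (bitmask : Int) (n : Int) (highest_first : Bool) : Int :=
  let m := PySem.Int.band bitmask 65534
  if m = 0 then 0
  else
    let cnt : Int := (PySem.Int.bitCount m : Int)
    let r : Int := if 1 ≤ n ∧ n ≤ cnt then n else 1
    if highest_first then
      let m' := (PySem.List.pyRange 0 (r - 1)).foldl
        (fun s _ => PySem.Int.bxor s ((1 : Int) <<< (PySem.Int.bitLength s - 1))) m
      (PySem.Int.bitLength m' : Int) - 1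
    else
      let m' := (PySem.List.pyRange 0 (r - 1)).foldl
        (fun s _ => PySem.Int.band s (s - 1)) m
      (PySem.Int.bitLength (PySem.Int.band m' (-m')) : Int) - 1

-- ===== PRECONDITION & SPEC =====
def Spec_get_card_by_rank_py (bitmask : Int) (n : Int) (highest_first : Bool) (out : Int) : Prop := out = get_card_by_rank_py_alt bitmask n highest_first
instance (bitmask : Int) (n : Int) (highest_first : Bool) (out : Int) : Decidable (Spec_get_card_by_rank_py bitmask n highest_first out) := by unfold Spec_get_card_by_rank_py; infer_instance

-- ===== CLAIM (what is proved, stated in full; the proofs are below) =====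
def Claim_equal_get_card_by_rank_py : Prop := ∀ (bitmask : Int) (n : Int) (highest_first : Bool), Dom_get_card_by_rank_py bitmask n highest_first → Spec_get_card_by_rank_py bitmask n highest_first (get_card_by_rank_py bitmask n highest_first)

-- ===== LEMMAS AND PROOFS =====

-- ---- A-side: the stateful loop equals "select from the filtered list" ----

-- Once fallback is set (nonzero), A's loop returns the (n-count)-th remaining match, else the fallback.
lemma pvALoop_of_ne (bitmask : Int) (l : List Int) (n : Int) :
    ∀ (c f : Int), c < n → f ≠ 0 →
    pvALoop bitmask n l c f =
      if n - c ≤ ((l.filter (pvBit bitmask)).length : Int) then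
        (l.filter (pvBit bitmask)).getD (n - c - 1).toNat 0
      else f := by
  induction l with
  | nil =>
    intro c f hc hf
    simp only [pvALoop, List.filter_nil, List.length_nil]
    rw [if_neg (by omega)]
  | cons i rest ih =>
    intro c f hc hf
    by_cases hp : pvBit bitmask i
    · simp only [pvALoop, hp, if_true]
      rw [if_neg hf]
      by_cases hcn : c + 1 = n
      · rw [if_pos hcn]
        simp only [List.filter_cons_of_pos hp, List.length_cons]
        rw [if_pos (by push_cast; omega)]
        have h0 : (n - c - 1).toNat = 0 := by omega
        simp [h0]
      · rw [if_neg hcn, ih (c + 1) f (by omega) hf]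
        simp only [List.filter_cons_of_pos hp, List.length_cons]
        have hidx : (n - c - 1).toNat = (n - (c + 1) - 1).toNat + 1 := by omega
        split_ifs with h1 h2 h2
        · rw [hidx, List.getD_cons_succ]
        · exfalso; push_cast at h1 h2; omega
        · exfalso; push_cast at h1 h2; omega
        · rfl
    · simp only [pvALoop, hp, List.filter_cons_of_neg hp]
      exact ih c f hc hf

-- From the initial state, A's loop computes "select from the ordered list of matches".
lemma pvALoop_start (bitmask : Int) (l : List Int) (n : Int) (hn : 1 ≤ n)
    (hl : ∀ i ∈ l, i ≠ 0) :
    pvALoop bitmask n l 0 0 =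
      if (l.filter (pvBit bitmask)).length = 0 then 0
      else if n ≤ ((l.filter (pvBit bitmask)).length : Int) then
        (l.filter (pvBit bitmask)).getD (n - 1).toNat 0
      else (l.filter (pvBit bitmask)).getD 0 0 := by
  induction l with
  | nil => simp [pvALoop]
  | cons i rest ih =>
    by_cases hp : pvBit bitmask i
    · have hi : i ≠ 0 := hl i (by simp)
      simp only [pvALoop, hp, if_true]
      by_cases hn1 : (0 : Int) + 1 = n
      · rw [if_pos hn1]
        simp only [List.filter_cons_of_pos hp, List.length_cons]
        rw [if_neg (by omega), if_pos (by push_cast; omega)]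
        have h0 : (n - 1).toNat = 0 := by omega
        simp [h0]
      · rw [if_neg hn1, pvALoop_of_ne bitmask rest n (0 + 1) i (by omega) hi]
        simp only [List.filter_cons_of_pos hp, List.length_cons]
        have hidx : (n - 1).toNat = (n - (0 + 1) - 1).toNat + 1 := by omega
        split_ifs with h1 h2 h3 h4 h5
        · exact h2.elim
        · rw [hidx, List.getD_cons_succ]
        · exfalso; omega
        · exact h4.elim
        · exfalso; omega
        · rfl
    · simp only [pvALoop, hp, List.filter_cons_of_neg hp]
      exact ih (fun j hj => hl j (by simp [hj]))

lemma pvMem_hi_ne_zero : ∀ i ∈ PySem.List.pyRange 15 0 (-1), i ≠ 0 := by decide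
lemma pvMem_lo_ne_zero : ∀ i ∈ PySem.List.pyRange 1 16 1, i ≠ 0 := by decide

-- ---- generic bit toolbox ----
lemma pvLand_add_ldiff : ∀ x : Nat, ∀ c : Nat, (x &&& c) + Nat.ldiff x c = x := by
  intro x
  induction x using Nat.binaryRec with
  | zero =>
    intro c
    have h2 : Nat.ldiff 0 c = 0 := by
      apply Nat.eq_of_testBit_eq
      intro i
      simp [Nat.testBit_ldiff]
    rw [Nat.zero_and, h2]
  | bit b x ih =>
    intro c
    induction c using Nat.bitCasesOn with
    | _ b' c' =>
      rw [Nat.land_bit, Nat.ldiff_bit, Nat.bit_val, Nat.bit_val, Nat.bit_val]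
      have := ih c'
      cases b <;> cases b' <;> simp <;> omega

lemma pvSub_land (x c : Nat) : x - (x &&& c) = Nat.ldiff x c := by
  have h1 := pvLand_add_ldiff x c
  omega
lemma pvBit_natCast (u : Nat) (i : Int) : pvBit (u : Int) i = u.testBit i.toNat := by
  have h : ((u : Int) >>> i.toNat) = ((u >>> i.toNat : Nat) : Int) := rfl
  have h1 : (1 : Int) = ((1 : Nat) : Int) := rfl
  rw [pvBit, h, h1, PySem.Int.band_natCast]
  rcases Nat.mod_two_eq_zero_or_one (u >>> i.toNat) with h2 | h2 <;>
    simp [Nat.testBit, Nat.land_comm, Nat.and_one_is_mod, h2]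

lemma pvBandNegSucc1 (x : Nat) : PySem.Int.band (Int.negSucc x) 1 = ((1 - (1 &&& x) : Nat) : Int) := by
  unfold PySem.Int.band
  rw [if_neg (by exact of_decide_eq_false rfl), if_pos (by norm_num)]
  norm_num

lemma pvBit_negSucc (c : Nat) (i : Int) : pvBit (Int.negSucc c) i = !(c.testBit i.toNat) := by
  have h : (Int.negSucc c) >>> i.toNat = Int.negSucc (c >>> i.toNat) := rfl
  rw [pvBit, h, pvBandNegSucc1]
  have hc : 1 &&& (c >>> i.toNat) = if c.testBit i.toNat then 1 else 0 := by
    rcases Nat.mod_two_eq_zero_or_one (c >>> i.toNat) with h2 | h2 <;>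
      simp [Nat.testBit, Nat.land_comm, Nat.and_one_is_mod, h2]
  by_cases ht : c.testBit i.toNat <;> simp [ht, hc]

lemma pvTestBit_65534 : ∀ i : Nat, Nat.testBit 65534 i = (decide (1 ≤ i) && decide (i ≤ 15)) := by
  intro i
  by_cases h : i < 16
  · interval_cases i <;> decide
  · rw [Nat.testBit_lt_two_pow (by
      calc (65534 : Nat) < 2 ^ 16 := by norm_num
      _ ≤ 2 ^ i := Nat.pow_le_pow_right (by norm_num) (by omega))]
    symm
    simp only [Bool.and_eq_false_iff, decide_eq_false_iff_not]
    omega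

lemma pvBandNegSucc (c : Nat) : PySem.Int.band (Int.negSucc c) 65534 = ((65534 - (65534 &&& c) : Nat) : Int) := by
  unfold PySem.Int.band
  rw [if_neg (by exact of_decide_eq_false rfl), if_pos (by norm_num)]
  norm_num
  rfl

lemma pvMask_nonneg (b : Int) : 0 ≤ PySem.Int.band b 65534 := by
  unfold PySem.Int.band
  split_ifs <;> simp <;> omega

lemma pvMask_testBit (b : Int) (i : Nat) :
    (PySem.Int.band b 65534).toNat.testBit i = (decide (1 ≤ i) && decide (i ≤ 15) && pvBit b (i : Int)) := by
  cases b with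
  | ofNat v =>
    have h : PySem.Int.band (Int.ofNat v) 65534 = ((v &&& 65534 : Nat) : Int) := by
      have := PySem.Int.band_natCast v 65534
      simpa using this
    rw [h]
    simp only [Int.toNat_natCast, Nat.testBit_and, pvTestBit_65534]
    have hb : pvBit (Int.ofNat v) (i : Int) = v.testBit i := by
      have := pvBit_natCast v (i : Int)
      simpa using this
    rw [hb]
    cases v.testBit i <;> simp
  | negSucc c =>
    rw [pvBandNegSucc c, pvSub_land]
    simp only [Int.toNat_natCast, Nat.testBit_ldiff, pvTestBit_65534]
    rw [pvBit_negSucc]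
    simp only [Int.toNat_natCast]

-- ---- bit-position lists ----
def pvP (u : Nat) (i : Int) : Bool := u.testBit i.toNat
def pvF (u : Nat) : List Int := (PySem.List.pyRange 1 16 1).filter (pvP u)
def pvHu (u : Nat) : Prop := ∀ i, u.testBit i = true → 1 ≤ i ∧ i ≤ 15

lemma pvMask_H (b : Int) : pvHu (PySem.Int.band b 65534).toNat := by
  intro i hi
  rw [pvMask_testBit] at hi
  simp only [Bool.and_eq_true, decide_eq_true_eq] at hi
  exact ⟨hi.1.1, hi.1.2⟩

lemma pvF_zero : pvF 0 = [] := by decide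

lemma pvFilter_eq (b : Int) :
    (PySem.List.pyRange 1 16 1).filter (pvBit b) = pvF (PySem.Int.band b 65534).toNat := by
  unfold pvF
  apply List.filter_congr
  intro i hi
  rw [PySem.List.mem_pyRange_one] at hi
  unfold pvP
  rw [pvMask_testBit]
  have h1 : (1 ≤ i.toNat) := by omega
  have h2 : (i.toNat ≤ 15) := by omega
  have h3 : ((i.toNat : Int)) = i := by omega
  simp [h1, h2, h3]

lemma pvDesc_eq : PySem.List.pyRange 15 0 (-1) = (PySem.List.pyRange 1 16 1).reverse := by decide

-- ---- low/high bit decompositions ----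
lemma pvDecomp (u : Nat) (hu : u ≠ 0) : ∃ t s, u = 2 ^ (t + 1) * s + 2 ^ t := by
  induction u using Nat.strong_induction_on with
  | _ u ih =>
    rcases Nat.mod_two_eq_zero_or_one u with h | h
    · have h2 : u / 2 ≠ 0 := by omega
      obtain ⟨t, s, hts⟩ := ih (u / 2) (by omega) h2
      have h3 : u = 2 * (u / 2) := by omega
      exact ⟨t + 1, s, by rw [h3, hts]; ring⟩
    · exact ⟨0, u / 2, by norm_num; omega⟩

lemma pvDecomp_testBit (t s j : Nat) :
    (2 ^ (t + 1) * s + 2 ^ t).testBit j =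
      if j < t then false else if j = t then true else s.testBit (j - (t + 1)) := by
  rw [Nat.testBit_two_pow_mul_add s (Nat.pow_lt_pow_right (by norm_num) (by omega)) j]
  by_cases h1 : j < t
  · rw [if_pos (by omega), if_pos h1, Nat.testBit_two_pow_of_ne (by omega)]
  · by_cases h2 : j = t
    · rw [if_pos (by omega), if_neg h1, if_pos h2, h2, Nat.testBit_two_pow_self]
    · rw [if_neg (by omega), if_neg h1, if_neg h2]

lemma pvLand_pred (t s : Nat) :
    (2 ^ (t + 1) * s + 2 ^ t) &&& (2 ^ (t + 1) * s + 2 ^ t - 1) = 2 ^ (t + 1) * s := by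
  have hpos : (1 : Nat) ≤ 2 ^ t := Nat.one_le_two_pow
  have hlt : 2 ^ t - 1 < 2 ^ (t + 1) := by
    have : (2:Nat) ^ t < 2 ^ (t+1) := Nat.pow_lt_pow_right (by norm_num) (by omega)
    omega
  have hsub : 2 ^ (t + 1) * s + 2 ^ t - 1 = 2 ^ (t + 1) * s + (2 ^ t - 1) := by omega
  apply Nat.eq_of_testBit_eq
  intro j
  rw [Nat.testBit_and, pvDecomp_testBit, hsub,
    Nat.testBit_two_pow_mul_add s hlt j, Nat.testBit_two_pow_sub_one,
    Nat.testBit_two_pow_mul]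
  by_cases h1 : j < t
  · simp [h1]
    omega
  · by_cases h2 : j = t
    · simp [h1, h2]
    · have h3 : ¬ (j < t + 1) := by omega
      have h4 : j ≥ t + 1 := by omega
      simp [h1, h2, h3, h4]

-- high-side decomposition
lemma pvBitLen_pos (u : Nat) (hu : u ≠ 0) : 0 < PySem.Int.bitLength (u : Int) := by
  rw [PySem.Int.bitLength_natCast (by omega)]
  omega

lemma pvHigh_bounds (u : Nat) (hu : u ≠ 0) :
    2 ^ (PySem.Int.bitLength (u : Int) - 1) ≤ u ∧ u < 2 ^ (PySem.Int.bitLength (u : Int) - 1 + 1) := by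
  have h1 := PySem.Int.two_pow_bitLength_le (u : Int) (by exact_mod_cast hu)
  have h2 := PySem.Int.lt_two_pow_bitLength (u : Int)
  have h3 : ((u : Int)).natAbs = u := Int.natAbs_natCast u
  have h4 := pvBitLen_pos u hu
  constructor
  · rw [h3] at h1; exact h1
  · rw [h3] at h2
    have h5 : PySem.Int.bitLength (u : Int) - 1 + 1 = PySem.Int.bitLength (u : Int) := by omega
    rw [h5]; exact h2

lemma pvHigh_testBit (g r j : Nat) (hr : r < 2 ^ g) :
    (2 ^ g + r).testBit j = if j = g then true else r.testBit j := by
  by_cases h1 : j = g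
  · rw [if_pos h1, h1, Nat.testBit_two_pow_add_eq, Nat.testBit_lt_two_pow hr]
    rfl
  · rw [if_neg h1]
    rcases Nat.lt_or_ge j g with h2 | h2
    · exact Nat.testBit_two_pow_add_gt h2 r
    · have h3 : g < j := by omega
      rw [Nat.testBit_lt_two_pow (x := 2 ^ g + r) (by
        calc 2 ^ g + r < 2 ^ g + 2 ^ g := by omega
        _ = 2 ^ (g + 1) := by ring
        _ ≤ 2 ^ j := Nat.pow_le_pow_right (by norm_num) (by omega)),
        Nat.testBit_lt_two_pow (x := r) (by
        calc r < 2 ^ g := hr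
        _ ≤ 2 ^ j := Nat.pow_le_pow_right (by norm_num) (by omega))]

lemma pvXor_top (g r : Nat) (hr : r < 2 ^ g) : (2 ^ g + r) ^^^ 2 ^ g = r := by
  apply Nat.eq_of_testBit_eq
  intro j
  rw [Nat.testBit_xor, pvHigh_testBit g r j hr]
  by_cases h1 : j = g
  · rw [if_pos h1, h1, Nat.testBit_two_pow_self, Nat.testBit_lt_two_pow hr]
    rfl
  · rw [if_neg h1, Nat.testBit_two_pow_of_ne (by omega)]
    cases r.testBit j <;> rfl

-- bitLength of a power of two
lemma pvBitLen_pow (t : Nat) : PySem.Int.bitLength ((2 ^ t : Nat) : Int) = t + 1 := by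
  induction t with
  | zero =>
    rw [PySem.Int.bitLength_natCast (by norm_num)]
    simp [PySem.Int.bitLength_zero]
  | succ t ih =>
    rw [PySem.Int.bitLength_natCast (by positivity)]
    have h : 2 ^ (t + 1) / 2 = 2 ^ t := by
      rw [pow_succ, Nat.mul_div_cancel]; norm_num
    rw [h, ih]

lemma pvBC_double (m : Nat) : PySem.Int.bitCount ((2 * m : Nat) : Int) = PySem.Int.bitCount ((m : Nat) : Int) := by
  rcases Nat.eq_zero_or_pos m with h | h
  · simp [h]
  · rw [PySem.Int.bitCount_natCast (by omega)]
    rw [Nat.mul_mod_right, Nat.mul_div_cancel_left m (by norm_num : (0:Nat) < 2)]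
    omega

lemma pvBC_pow_mul (k m : Nat) : PySem.Int.bitCount ((2 ^ k * m : Nat) : Int) = PySem.Int.bitCount ((m : Nat) : Int) := by
  induction k with
  | zero => norm_num
  | succ k ih =>
    have h : 2 ^ (k + 1) * m = 2 * (2 ^ k * m) := by ring
    rw [h, pvBC_double, ih]

lemma pvBC_low (t : Nat) : ∀ s : Nat,
    PySem.Int.bitCount ((2 ^ (t + 1) * s + 2 ^ t : Nat) : Int) = 1 + PySem.Int.bitCount ((s : Nat) : Int) := by
  induction t with
  | zero =>
    intro s
    rw [PySem.Int.bitCount_natCast (by positivity)]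
    have h1 : 2 ^ (0 + 1) * s + 2 ^ 0 = 2 * s + 1 := by ring
    rw [h1]
    have h2 : (2 * s + 1) % 2 = 1 := by omega
    have h3 : (2 * s + 1) / 2 = s := by omega
    rw [h2, h3]
  | succ t ih =>
    intro s
    rw [PySem.Int.bitCount_natCast (by positivity)]
    have h1 : 2 ^ (t + 1 + 1) * s + 2 ^ (t + 1) = 2 * (2 ^ (t + 1) * s + 2 ^ t) := by ring
    have h2 : (2 * (2 ^ (t + 1) * s + 2 ^ t)) % 2 = 0 := by omega
    have h3 : (2 * (2 ^ (t + 1) * s + 2 ^ t)) / 2 = 2 ^ (t + 1) * s + 2 ^ t := by omega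
    rw [h1, h2, h3, ih s]
    omega
-- splitting an increasing pyRange at a midpoint
lemma pvRange_append (k : Nat) : ∀ a b : Int, a + k = b → ∀ c : Int, b ≤ c →
    PySem.List.pyRange a c = PySem.List.pyRange a b ++ PySem.List.pyRange b c := by
  induction k with
  | zero =>
    intro a b hab c hbc
    have h : a = b := by omega
    subst h
    have h2 : PySem.List.pyRange a a = [] := by
      rw [PySem.List.pyRange_of_pos a a (by norm_num : (0:Int) < 1)]
      simp
    rw [h2]; rfl
  | succ k ih =>
    intro a b hab c hbc
    have h1 : a < b := by omega
    have h2 : a < c := by omega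
    rw [PySem.List.pyRange_one_cons h2, PySem.List.pyRange_one_cons h1,
      ih (a + 1) b (by omega) c hbc]
    rfl

lemma pvRange_len (k : Nat) : ∀ b : Int, b = k → (PySem.List.pyRange 0 b).length = k := by
  induction k with
  | zero =>
    intro b hb; subst hb
    rw [PySem.List.pyRange_of_pos 0 ((0:Nat):Int) (by norm_num : (0:Int) < 1)]
    simp
  | succ k ih =>
    intro b hb
    have h : b = (k : Int) + 1 := by omega
    rw [h, PySem.List.pyRange_one_succ_right (by positivity), List.length_append,
      ih k rfl]
    simp

-- generic filter-splitting
lemma pvFilter_cons_split (l1 l2 : List Int) (t : Int) (p q : Int → Bool)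
    (h1 : ∀ j ∈ l1, p j = false) (ht : p t = true) (h2 : ∀ j ∈ l2, p j = q j)
    (hq1 : ∀ j ∈ l1, q j = false) (hqt : q t = false) :
    (l1 ++ t :: l2).filter p = t :: (l1 ++ t :: l2).filter q := by
  have e1 : l1.filter p = [] := List.filter_eq_nil_iff.mpr (by intro j hj; simp [h1 j hj])
  have e2 : l1.filter q = [] := List.filter_eq_nil_iff.mpr (by intro j hj; simp [hq1 j hj])
  have e3 : l2.filter p = l2.filter q := List.filter_congr h2
  simp [List.filter_append, List.filter_cons, ht, hqt, e1, e2, e3]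

lemma pvFilter_snoc_split (l1 l2 : List Int) (t : Int) (p q : Int → Bool)
    (h1 : ∀ j ∈ l1, p j = q j) (ht : p t = true) (h2 : ∀ j ∈ l2, p j = false)
    (hq2 : ∀ j ∈ l2, q j = false) (hqt : q t = false) :
    (l1 ++ t :: l2).filter p = (l1 ++ t :: l2).filter q ++ [t] := by
  have e1 : l2.filter p = [] := List.filter_eq_nil_iff.mpr (by intro j hj; simp [h2 j hj])
  have e2 : l2.filter q = [] := List.filter_eq_nil_iff.mpr (by intro j hj; simp [hq2 j hj])
  have e3 : l1.filter p = l1.filter q := List.filter_congr h1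
  simp [List.filter_append, List.filter_cons, ht, hqt, e1, e2, e3]

-- split [1..15] at position t
lemma pvRange_split (t : Nat) (h1 : 1 ≤ t) (h2 : t ≤ 15) :
    PySem.List.pyRange 1 16 1 = PySem.List.pyRange 1 (t : Int) ++ (t : Int) :: PySem.List.pyRange ((t : Int) + 1) 16 := by
  have e1 : PySem.List.pyRange 1 16 1 = PySem.List.pyRange 1 16 := rfl
  rw [e1, pvRange_append (t - 1) 1 (t : Int) (by omega) 16 (by omega),
    PySem.List.pyRange_one_cons (by omega : (t:Int) < 16)]

lemma pvMemRange1 {j : Int} (h : j ∈ PySem.List.pyRange 1 (t : Int)) : 1 ≤ j ∧ j < t :=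
  PySem.List.mem_pyRange_one.mp h
lemma pvMemRange2 {a j : Int} (h : j ∈ PySem.List.pyRange a 16) : a ≤ j ∧ j < 16 :=
  PySem.List.mem_pyRange_one.mp h

lemma pvF_cons (t s : Nat) (hu : pvHu (2 ^ (t + 1) * s + 2 ^ t)) :
    pvF (2 ^ (t + 1) * s + 2 ^ t) = (t : Int) :: pvF (2 ^ (t + 1) * s) := by
  have htb : (2 ^ (t + 1) * s + 2 ^ t).testBit t = true := by
    rw [pvDecomp_testBit]; simp
  obtain ⟨ht1, ht15⟩ := hu t htb
  unfold pvF
  rw [pvRange_split t ht1 ht15]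
  apply pvFilter_cons_split
  · intro j hj
    obtain ⟨hj1, hj2⟩ := pvMemRange1 hj
    unfold pvP
    rw [pvDecomp_testBit, if_pos (by omega)]
  · unfold pvP
    have : ((t:Int)).toNat = t := by omega
    rw [this, htb]
  · intro j hj
    obtain ⟨hj1, hj2⟩ := pvMemRange2 hj
    unfold pvP
    rw [pvDecomp_testBit, if_neg (by omega), if_neg (by omega), Nat.testBit_two_pow_mul]
    have : j.toNat ≥ t + 1 := by omega
    simp [this]
  · intro j hj
    obtain ⟨hj1, hj2⟩ := pvMemRange1 hj
    unfold pvP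
    rw [Nat.testBit_two_pow_mul]
    have : ¬ (j.toNat ≥ t + 1) := by omega
    simp [this]
  · unfold pvP
    rw [Nat.testBit_two_pow_mul]
    have : ¬ (((t:Int)).toNat ≥ t + 1) := by omega
    simp [this]

lemma pvF_snoc (g r : Nat) (hr : r < 2 ^ g) (hu : pvHu (2 ^ g + r)) :
    pvF (2 ^ g + r) = pvF r ++ [(g : Int)] := by
  have htb : (2 ^ g + r).testBit g = true := by
    rw [pvHigh_testBit g r g hr]; simp
  obtain ⟨hg1, hg15⟩ := hu g htb
  unfold pvF
  rw [pvRange_split g hg1 hg15]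
  apply pvFilter_snoc_split
  · intro j hj
    obtain ⟨hj1, hj2⟩ := pvMemRange1 hj
    unfold pvP
    rw [pvHigh_testBit g r j.toNat hr, if_neg (by omega)]
  · unfold pvP
    have : ((g:Int)).toNat = g := by omega
    rw [this, htb]
  · intro j hj
    obtain ⟨hj1, hj2⟩ := pvMemRange2 hj
    unfold pvP
    rw [pvHigh_testBit g r j.toNat hr, if_neg (by omega)]
    exact Nat.testBit_lt_two_pow (by
      calc r < 2 ^ g := hr
      _ ≤ 2 ^ j.toNat := Nat.pow_le_pow_right (by norm_num) (by omega))
  · intro j hj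
    obtain ⟨hj1, hj2⟩ := pvMemRange2 hj
    unfold pvP
    exact Nat.testBit_lt_two_pow (by
      calc r < 2 ^ g := hr
      _ ≤ 2 ^ j.toNat := Nat.pow_le_pow_right (by norm_num) (by omega))
  · unfold pvP
    have : ((g:Int)).toNat = g := by omega
    rw [this]
    exact Nat.testBit_lt_two_pow hr

-- ---- the strip loops walk the filtered list ----
lemma pvBandNeg (u : Nat) (hu : u ≠ 0) :
    PySem.Int.band (u : Int) (-(u : Int)) = ((u - (u &&& (u - 1)) : Nat) : Int) := by
  unfold PySem.Int.band
  rw [if_pos (by positivity), if_neg (by simp; omega)]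
  have he : ((- -(u:Int)) - 1).toNat = u - 1 := by omega
  rw [Int.toNat_natCast, he]

lemma pvBandPred (u : Nat) (hu : u ≠ 0) :
    PySem.Int.band (u : Int) ((u : Int) - 1) = ((u &&& (u - 1) : Nat) : Int) := by
  have h : ((u : Int) - 1) = ((u - 1 : Nat) : Int) := by omega
  rw [h, PySem.Int.band_natCast]

lemma pvShift1 (g : Nat) : ((1 : Int) <<< g) = ((2 ^ g : Nat) : Int) := by
  have h : ((1 : Int) <<< g) = (((1 <<< g : Nat) : Nat) : Int) := rfl
  rw [h]
  congr 1
  simp [Nat.shiftLeft_eq]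

lemma pvHu_low (t s : Nat) (hu : pvHu (2 ^ (t + 1) * s + 2 ^ t)) : pvHu (2 ^ (t + 1) * s) := by
  intro j hj
  apply hu j
  rw [Nat.testBit_two_pow_mul] at hj
  simp only [Bool.and_eq_true, decide_eq_true_eq] at hj
  rw [pvDecomp_testBit, if_neg (by omega), if_neg (by omega)]
  exact hj.2

lemma pvHu_high (g r : Nat) (hr : r < 2 ^ g) (hu : pvHu (2 ^ g + r)) : pvHu r := by
  intro j hj
  apply hu j
  rw [pvHigh_testBit g r j hr]
  by_cases h : j = g
  · simp [h]
  · simp [h, hj]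

lemma pvF_ne_nil (u : Nat) (hu : pvHu u) (h0 : u ≠ 0) : pvF u ≠ [] := by
  obtain ⟨t, s, hts⟩ := pvDecomp u h0
  subst hts
  rw [pvF_cons t s hu]
  simp

def pvStripLow (m : Int) : Int := PySem.Int.band m (m - 1)
def pvStripHigh (m : Int) : Int := PySem.Int.bxor m ((1 : Int) <<< (PySem.Int.bitLength m - 1))

lemma pvLow_main : ∀ (k u : Nat), pvHu u → k < (pvF u).length →
    (PySem.Int.bitLength (PySem.Int.band (pvStripLow^[k] (u : Int)) (-(pvStripLow^[k] (u : Int)))) : Int) - 1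
      = (pvF u).getD k 0 := by
  intro k
  induction k with
  | zero =>
    intro u hu hk
    have h0 : u ≠ 0 := by
      rintro rfl
      rw [pvF_zero] at hk
      simp at hk
    obtain ⟨t, s, hts⟩ := pvDecomp u h0
    subst hts
    simp only [Function.iterate_zero, id_eq]
    rw [pvBandNeg _ h0, pvLand_pred t s]
    have hsub : 2 ^ (t + 1) * s + 2 ^ t - 2 ^ (t + 1) * s = 2 ^ t := Nat.add_sub_cancel_left _ _
    rw [hsub, pvBitLen_pow t, pvF_cons t s hu]
    simp
  | succ k ih =>
    intro u hu hk
    have h0 : u ≠ 0 := by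
      rintro rfl
      rw [pvF_zero] at hk
      simp at hk
    obtain ⟨t, s, hts⟩ := pvDecomp u h0
    subst hts
    rw [Function.iterate_succ_apply]
    have hstep : pvStripLow ((2 ^ (t + 1) * s + 2 ^ t : Nat) : Int) = ((2 ^ (t + 1) * s : Nat) : Int) := by
      unfold pvStripLow
      rw [pvBandPred _ h0, pvLand_pred t s]
    have hk' : k < (pvF (2 ^ (t + 1) * s)).length := by
      rw [pvF_cons t s hu, List.length_cons] at hk
      omega
    rw [hstep, pvF_cons t s hu, List.getD_cons_succ]
    exact ih (2 ^ (t + 1) * s) (pvHu_low t s hu) hk'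

lemma pvHigh_main : ∀ (k u : Nat), pvHu u → k < (pvF u).length →
    (PySem.Int.bitLength (pvStripHigh^[k] (u : Int)) : Int) - 1 = (pvF u).reverse.getD k 0 := by
  intro k
  induction k with
  | zero =>
    intro u hu hk
    have h0 : u ≠ 0 := by
      rintro rfl
      rw [pvF_zero] at hk
      simp at hk
    obtain ⟨hb1, hb2⟩ := pvHigh_bounds u h0
    set g := PySem.Int.bitLength (u : Int) - 1 with hg
    have hgpos := pvBitLen_pos u h0
    have hr : u - 2 ^ g < 2 ^ g := by omega
    have hdec : u = 2 ^ g + (u - 2 ^ g) := by omega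
    simp only [Function.iterate_zero, id_eq]
    rw [hdec, pvF_snoc g (u - 2 ^ g) hr (by rw [← hdec]; exact hu)]
    have : PySem.Int.bitLength ((2 ^ g + (u - 2 ^ g) : Nat) : Int) = g + 1 := by
      rw [← hdec]; omega
    rw [this]
    simp
  | succ k ih =>
    intro u hu hk
    have h0 : u ≠ 0 := by
      rintro rfl
      rw [pvF_zero] at hk
      simp at hk
    obtain ⟨hb1, hb2⟩ := pvHigh_bounds u h0
    set g := PySem.Int.bitLength (u : Int) - 1 with hg
    have hgpos := pvBitLen_pos u h0
    have hr : u - 2 ^ g < 2 ^ g := by omega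
    have hdec : u = 2 ^ g + (u - 2 ^ g) := by omega
    rw [Function.iterate_succ_apply]
    have hstep : pvStripHigh ((u : Nat) : Int) = ((u - 2 ^ g : Nat) : Int) := by
      unfold pvStripHigh
      rw [← hg, pvShift1 g, PySem.Int.bxor_natCast]
      congr 1
      conv_lhs => rw [hdec]
      rw [pvXor_top g (u - 2 ^ g) hr]
    rw [hstep]
    have hsnoc : pvF u = pvF (u - 2 ^ g) ++ [(g : Int)] := by
      conv_lhs => rw [hdec]
      rw [pvF_snoc g (u - 2 ^ g) hr (by rw [← hdec]; exact hu)]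
    rw [hsnoc]
    rw [hsnoc] at hk
    simp only [List.length_append, List.length_cons, List.length_nil] at hk
    rw [List.reverse_append]
    simp only [List.reverse_cons, List.reverse_nil, List.nil_append, List.singleton_append,
      List.getD_cons_succ]
    apply ih (u - 2 ^ g)
    · apply pvHu_high g (u - 2 ^ g) hr
      rw [← hdec]; exact hu
    · omega

lemma pvFoldl_const (f : Int → Int) : ∀ (l : List Int) (x : Int),
    l.foldl (fun s _ => f s) x = f^[l.length] x := by
  intro l
  induction l with
  | nil => intro x; rfl
  | cons a l ih =>
    intro x
    rw [List.foldl_cons, ih, List.length_cons, Function.iterate_succ_apply]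

lemma pvBC_len : ∀ u : Nat, pvHu u → PySem.Int.bitCount ((u : Nat) : Int) = (pvF u).length := by
  intro u
  induction u using Nat.strong_induction_on with
  | _ u ih =>
    intro hu
    rcases eq_or_ne u 0 with rfl | h0
    · rw [pvF_zero]
      simp [PySem.Int.bitCount_zero]
    · obtain ⟨t, s, hts⟩ := pvDecomp u h0
      subst hts
      have hp : (1 : Nat) ≤ 2 ^ t := Nat.one_le_two_pow
      rw [pvBC_low t s, pvF_cons t s hu, List.length_cons,
        show PySem.Int.bitCount ((s : Nat) : Int) = PySem.Int.bitCount ((2 ^ (t + 1) * s : Nat) : Int) from (pvBC_pow_mul (t + 1) s).symm,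
        ih (2 ^ (t + 1) * s) (by omega) (pvHu_low t s hu)]
      omega

-- ---- assembling the two programs ----
lemma pvSelect (u : Nat) (hu : pvHu u) (h0 : u ≠ 0) (L : List Int) (n : Int)
    (hlen : L.length = (pvF u).length) :
    (if L.length = 0 then 0
     else if (if n ≤ 0 then 1 else n) ≤ (L.length : Int) then
       L.getD ((if n ≤ 0 then 1 else n) - 1).toNat 0
     else L.getD 0 0) =
      L.getD (((if 1 ≤ n ∧ n ≤ ((PySem.Int.bitCount ((u:Nat):Int) : Nat) : Int) then n else 1) - 1).toNat) 0 := by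
  have hcnt : ((PySem.Int.bitCount ((u:Nat):Int) : Nat) : Int) = (L.length : Int) := by
    rw [pvBC_len u hu, hlen]
  have hne : L.length ≠ 0 := by
    rw [hlen]
    intro hc
    exact pvF_ne_nil u hu h0 (List.length_eq_zero_iff.mp hc)
  rw [hcnt, if_neg hne]
  by_cases hn0 : n ≤ 0
  · have h1 : ¬ (1 ≤ n ∧ n ≤ (L.length : Int)) := by omega
    have h2 : (1 : Int) ≤ (L.length : Int) := by omega
    rw [if_neg h1, if_pos hn0, if_pos h2]
  · rw [if_neg hn0]
    by_cases hle : n ≤ (L.length : Int)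
    · rw [if_pos (⟨by omega, hle⟩ : (1 ≤ n ∧ n ≤ (L.length : Int))), if_pos hle]
    · rw [if_neg (by omega : ¬ (1 ≤ n ∧ n ≤ (L.length : Int))), if_neg hle]
      norm_num

lemma pvRank_bounds (u : Nat) (hu : pvHu u) (h0 : u ≠ 0) (n : Int) :
    1 ≤ (if 1 ≤ n ∧ n ≤ ((PySem.Int.bitCount ((u:Nat):Int) : Nat) : Int) then n else 1) ∧
    (if 1 ≤ n ∧ n ≤ ((PySem.Int.bitCount ((u:Nat):Int) : Nat) : Int) then n else 1) ≤ ((pvF u).length : Int) := by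
  have hcnt : ((PySem.Int.bitCount ((u:Nat):Int) : Nat) : Int) = ((pvF u).length : Int) := by
    rw [pvBC_len u hu]
  have hpos : 0 < (pvF u).length := by
    rcases Nat.eq_zero_or_pos (pvF u).length with hz | hp
    · exact absurd (List.length_eq_zero_iff.mp hz) (pvF_ne_nil u hu h0)
    · exact hp
  rw [hcnt]
  constructor <;> (split_ifs with hif) <;> omega

lemma pvFoldl_iter (f : Int → Int) (r : Int) (hr : 1 ≤ r) (x : Int) :
    (PySem.List.pyRange 0 (r - 1)).foldl (fun s _ => f s) x = f^[(r - 1).toNat] x := by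
  rw [pvFoldl_const f, pvRange_len (r - 1).toNat (r - 1) (by omega)]
lemma pvMain : ∀ (bitmask : Int) (n : Int) (highest_first : Bool),
    get_card_by_rank_py bitmask n highest_first = get_card_by_rank_py_alt bitmask n highest_first := by
  intro b n h
  have hm0 : PySem.Int.band b 65534 = ((PySem.Int.band b 65534).toNat : Int) :=
    (Int.toNat_of_nonneg (pvMask_nonneg b)).symm
  set u : Nat := (PySem.Int.band b 65534).toNat with hudef
  have hu : pvHu u := pvMask_H b
  have hn' : (1 : Int) ≤ (if n ≤ 0 then 1 else n) := by split_ifs <;> omega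
  by_cases hz : PySem.Int.band b 65534 = 0
  · -- no cards: both return 0
    have hu0 : u = 0 := by rw [hudef, hz]; rfl
    have hF : pvF u = [] := by rw [hu0, pvF_zero]
    unfold get_card_by_rank_py get_card_by_rank_py_alt
    rw [if_pos hz]
    cases h
    · simp only [Bool.false_eq_true, if_false]
      rw [pvALoop_start b _ _ hn' pvMem_lo_ne_zero, pvFilter_eq b, ← hudef, hF]
      simp
    · simp only [if_true]
      rw [pvALoop_start b _ _ hn' pvMem_hi_ne_zero, pvDesc_eq, List.filter_reverse,
        pvFilter_eq b, ← hudef, hF]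
      simp
  · have h0 : u ≠ 0 := by
      intro hc
      apply hz
      rw [hm0, hc]
      rfl
    have hrb := pvRank_bounds u hu h0 n
    set r : Int := if 1 ≤ n ∧ n ≤ ((PySem.Int.bitCount ((u:Nat):Int) : Nat) : Int) then n else 1 with hrdef
    have hk : (r - 1).toNat < (pvF u).length := by omega
    unfold get_card_by_rank_py get_card_by_rank_py_alt
    rw [if_neg hz, hm0]
    cases h
    · -- lowest_first
      simp only [Bool.false_eq_true, if_false]
      rw [pvALoop_start b _ _ hn' pvMem_lo_ne_zero, pvFilter_eq b, ← hudef]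
      have hsel := pvSelect u hu h0 (pvF u) n rfl
      rw [hsel, ← hrdef]
      have hfold := pvFoldl_iter (fun s => PySem.Int.band s (s - 1)) r (by omega) ((u : Nat) : Int)
      rw [show (fun (s _ : Int) => PySem.Int.band s (s - 1)) = (fun (s : Int) (_ : Int) => (fun s' => PySem.Int.band s' (s' - 1)) s) from rfl]
      rw [hfold]
      exact (pvLow_main ((r-1).toNat) u hu hk).symm
    · -- highest_first
      simp only [if_true]
      rw [pvALoop_start b _ _ hn' pvMem_hi_ne_zero, pvDesc_eq, List.filter_reverse,
        pvFilter_eq b, ← hudef]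
      have hsel := pvSelect u hu h0 (pvF u).reverse n (by simp)
      rw [hsel, ← hrdef]
      have hfold := pvFoldl_iter (fun s => PySem.Int.bxor s ((1 : Int) <<< (PySem.Int.bitLength s - 1))) r (by omega) ((u : Nat) : Int)
      rw [show (fun (s _ : Int) => PySem.Int.bxor s ((1 : Int) <<< (PySem.Int.bitLength s - 1))) = (fun (s : Int) (_ : Int) => (fun s' => PySem.Int.bxor s' ((1 : Int) <<< (PySem.Int.bitLength s' - 1))) s) from rfl]
      rw [hfold]
      exact (pvHigh_main ((r-1).toNat) u hu hk).symm

-- ===== VERDICT (by name: the statement is the Claim_ definition above) =====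
theorem get_card_by_rank_py_spec : Claim_equal_get_card_by_rank_py := by
  intro bitmask n highest_first _
  unfold Spec_get_card_by_rank_py
  exact pvMain bitmask n highest_first
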